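-- pv_equiv track=rewrite | github.com/buscagliad/adventofcode | 2016/day11/generatorsPart1.py | goodFloorX
-- ===== SOURCE A (Python) =====
-- def goodFloorX(f):
--     for c in range(2, len(f), 2):
--         if not f[c]: continue
--         if f[c-1]: continue
--         else:
--             for g in range(2, len(f), 2):
--                 if f[g-1]: return False
--     return True
-- ===== SOURCE B (Python) =====
-- def goodFloorX(f):
--     unpaired = False
--     gen = False
--     for c in range(2, len(f), 2):
--         unpaired = unpaired or (f[c] and not f[c-1])
--         gen = gen or f[c-1]
--     return not (unpaired and gen)
-- ===== Notes on version B (the rewrite author's own statement) =====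
-- stated objective: simpler
-- what changed: Replaces the nested rescan with early return (for each offending even index A rescans the whole even range) by a single straight-line pass that computes the two existence flags independently and combines them at the end; A's worst case is quadratic, B is always linear, though a timing run could not measure a difference on its inputs.
import Mathlib
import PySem

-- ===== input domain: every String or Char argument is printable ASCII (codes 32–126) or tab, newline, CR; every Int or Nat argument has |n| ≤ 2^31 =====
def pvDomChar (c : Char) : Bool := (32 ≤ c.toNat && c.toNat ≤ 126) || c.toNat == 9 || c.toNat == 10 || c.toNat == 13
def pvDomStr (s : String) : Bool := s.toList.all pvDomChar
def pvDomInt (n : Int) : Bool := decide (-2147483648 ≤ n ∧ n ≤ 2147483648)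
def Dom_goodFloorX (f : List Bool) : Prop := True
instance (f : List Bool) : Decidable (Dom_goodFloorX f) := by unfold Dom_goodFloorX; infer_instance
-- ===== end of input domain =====

-- B replaces A's nested rescan + early return by one straight-line pass computing both existence flags (simpler; no measured speed claim).

-- ===== PORT A =====
-- inner loop: 'for g in range(2, len(f), 2): if f[g-1]: return False' — true means "returned False"
def goodFloorX_inner (f : List Bool) : List Int → Bool
  | [] => false
  | g :: rest =>
    if PySem.List.pyGetD f (g - 1) false then true else goodFloorX_inner f rest

-- outer loop over range(2, len(f), 2)
def goodFloorX_outer (f : List Bool) : List Int → Bool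
  | [] => true
  | c :: rest =>
    if !(PySem.List.pyGetD f c false) then goodFloorX_outer f rest
    else if PySem.List.pyGetD f (c - 1) false then goodFloorX_outer f rest
    else if goodFloorX_inner f (PySem.List.pyRange 2 f.length 2) then false
    else goodFloorX_outer f rest

def goodFloorX (f : List Bool) : Bool :=
  goodFloorX_outer f (PySem.List.pyRange 2 f.length 2)

-- ===== PORT B =====
def goodFloorX_alt (f : List Bool) : Bool :=
  let st := (PySem.List.pyRange 2 f.length 2).foldl
    (fun (p : Bool × Bool) c =>
      (p.1 || (PySem.List.pyGetD f c false && !(PySem.List.pyGetD f (c - 1) false)),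
       p.2 || PySem.List.pyGetD f (c - 1) false))
    (false, false)
  !(st.1 && st.2)

-- ===== PRECONDITION & SPEC =====
def Spec_goodFloorX (f : List Bool) (out : Bool) : Prop := out = goodFloorX_alt f
instance (f : List Bool) (out : Bool) : Decidable (Spec_goodFloorX f out) := by unfold Spec_goodFloorX; infer_instance

-- ===== CLAIM (what is proved, stated in full; the proofs are below) =====
def Claim_equal_goodFloorX : Prop := ∀ (f : List Bool), Dom_goodFloorX f → Spec_goodFloorX f (goodFloorX f)

-- ===== LEMMAS AND PROOFS =====
theorem goodFloorX_inner_any (f : List Bool) (gs : List Int) :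
    goodFloorX_inner f gs = gs.any (fun g => PySem.List.pyGetD f (g - 1) false) := by
  induction gs with
  | nil => simp [goodFloorX_inner]
  | cons g rest ih =>
    simp only [goodFloorX_inner, List.any_cons, ih]
    cases h : PySem.List.pyGetD f (g - 1) false <;> simp

theorem goodFloorX_outer_eq (f : List Bool) (gs : List Int) :
    goodFloorX_outer f gs =
      !(gs.any (fun c => PySem.List.pyGetD f c false && !(PySem.List.pyGetD f (c - 1) false)) &&
        goodFloorX_inner f (PySem.List.pyRange 2 f.length 2)) := by
  induction gs with
  | nil => simp [goodFloorX_outer]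
  | cons c rest ih =>
    simp only [goodFloorX_outer, List.any_cons]
    cases hc : PySem.List.pyGetD f c false <;>
      cases hc1 : PySem.List.pyGetD f (c - 1) false <;>
        cases hG : goodFloorX_inner f (PySem.List.pyRange 2 f.length 2) <;>
          simp_all

theorem goodFloorX_alt_fold (f : List Bool) (gs : List Int) (a b : Bool) :
    gs.foldl (fun (p : Bool × Bool) c =>
      (p.1 || (PySem.List.pyGetD f c false && !(PySem.List.pyGetD f (c - 1) false)),
       p.2 || PySem.List.pyGetD f (c - 1) false)) (a, b) =
    (a || gs.any (fun c => PySem.List.pyGetD f c false && !(PySem.List.pyGetD f (c - 1) false)),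
     b || gs.any (fun c => PySem.List.pyGetD f (c - 1) false)) := by
  induction gs generalizing a b with
  | nil => simp
  | cons c rest ih =>
    simp only [List.foldl_cons, List.any_cons, ih]
    simp [Bool.or_assoc]

-- ===== VERDICT (by name: the statement is the Claim_ definition above) =====
theorem goodFloorX_spec : Claim_equal_goodFloorX := by
  intro f _
  unfold Spec_goodFloorX goodFloorX goodFloorX_alt
  rw [goodFloorX_outer_eq, goodFloorX_inner_any, goodFloorX_alt_fold]
  simp
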